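-- pv_equiv track=rewrite | github.com/venkatmiriyala19/GeeksForGeeks | Difficulty: Basic/Remove consonants from a string/remove-consonants-from-a-string.py | removeConsonants
-- ===== SOURCE A (Python) =====
-- def removeConsonants(s):
--     s1=""
--     for i in s:
--         if i in 'aeiouAEIOU':
--             s1+=i
--     if s1:
--         return s1
--     return "No Vowel"
-- ===== SOURCE B (Python) =====
-- VOWELS = frozenset("aeiouAEIOU")
--
-- def removeConsonants(s):
--     # build a translation table deleting every distinct non-vowel char of s,
--     # then strip them all in one translate pass
--     delete = dict.fromkeys(map(ord, set(s) - VOWELS))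
--     s1 = s.translate(delete)
--     return s1 if s1 else "No Vowel"
-- ===== Notes on version B (the rewrite author's own statement) =====
-- stated objective: alternative
-- what changed: Instead of accumulating vowels character by character, B first builds the set of distinct non-vowel characters occurring in s and deletes them all with one str.translate pass, keeping the same empty-result guard.
import Mathlib
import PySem

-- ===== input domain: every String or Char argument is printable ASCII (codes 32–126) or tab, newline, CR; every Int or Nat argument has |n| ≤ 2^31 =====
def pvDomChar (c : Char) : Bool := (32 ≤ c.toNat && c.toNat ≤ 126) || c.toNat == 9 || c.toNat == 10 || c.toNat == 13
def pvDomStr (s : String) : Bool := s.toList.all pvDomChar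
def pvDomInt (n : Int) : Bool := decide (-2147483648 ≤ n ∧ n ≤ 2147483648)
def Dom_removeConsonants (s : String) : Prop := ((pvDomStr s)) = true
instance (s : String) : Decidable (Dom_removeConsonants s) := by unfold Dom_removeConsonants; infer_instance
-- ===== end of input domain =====

-- B builds the set of distinct non-vowel characters of s and deletes them with one
-- translate pass, instead of A's per-character vowel accumulation loop (alternative).


-- ===== PORT A =====
-- literal port: accumulate vowels one character at a time, then the empty guard
def removeConsonants (s : String) : String :=
  let s1 := s.toList.foldl (fun acc c => if c ∈ "aeiouAEIOU".toList then acc ++ [c] else acc) []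
  if s1 ≠ [] then String.ofList s1 else "No Vowel"

-- ===== PORT B =====
-- set(s) - VOWELS as a PySem.Set; s.translate(delete-table) removes exactly the
-- characters of that set (ported by hand: translate with an all-None table is
-- exactly "drop every character that is a key"; exact, since lookup is by char only)
def removeConsonants_alt (s : String) : String :=
  let delete : PySem.Set Char := PySem.Set.diff (PySem.Set.ofList s.toList) "aeiouAEIOU".toList
  let s1 := String.ofList (s.toList.filter (fun c => !(PySem.Set.contains delete c)))
  if s1 = "" then "No Vowel" else s1

-- ===== PRECONDITION & SPEC =====
def Spec_removeConsonants (s : String) (out : String) : Prop := out = removeConsonants_alt s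
instance (s : String) (out : String) : Decidable (Spec_removeConsonants s out) := by unfold Spec_removeConsonants; infer_instance

-- ===== CLAIM (what is proved, stated in full; the proofs are below) =====
def Claim_equal_removeConsonants : Prop := ∀ (s : String), Dom_removeConsonants s → Spec_removeConsonants s (removeConsonants s)

-- ===== LEMMAS AND PROOFS =====
-- A's accumulation loop is the vowel filter
theorem removeConsonants_fold_eq_filter (s : String) :
    s.toList.foldl (fun acc c => if c ∈ "aeiouAEIOU".toList then acc ++ [c] else acc) ([] : List Char)
      = s.toList.filter (fun c => c ∈ "aeiouAEIOU".toList) := by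
  simpa using PySem.List.foldl_append_if_eq_filter (fun c => decide (c ∈ "aeiouAEIOU".toList)) s.toList ([] : List Char)

-- B's "not in delete-set" test agrees with "is a vowel" on the characters of s itself
theorem removeConsonants_filters_agree (s : String) :
    s.toList.filter (fun c => !(PySem.Set.contains (PySem.Set.diff (PySem.Set.ofList s.toList) "aeiouAEIOU".toList) c))
      = s.toList.filter (fun c => c ∈ "aeiouAEIOU".toList) := by
  apply List.filter_congr
  intro c hc
  by_cases hv : c ∈ "aeiouAEIOU".toList <;>
    simpa [PySem.Set.mem_diff, PySem.Set.mem_ofList, hc] using hv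

theorem ofList_eq_empty_iff (l : List Char) : String.ofList l = "" ↔ l = [] := by
  constructor
  · intro h
    have := congrArg String.toList h
    simpa using this
  · intro h; subst h; rfl

-- ===== VERDICT (by name: the statement is the Claim_ definition above) =====
theorem removeConsonants_spec : Claim_equal_removeConsonants := by
  intro s _
  unfold Spec_removeConsonants removeConsonants removeConsonants_alt
  simp only [removeConsonants_fold_eq_filter, removeConsonants_filters_agree]
  by_cases h : s.toList.filter (fun c => c ∈ "aeiouAEIOU".toList) = []
  · rw [if_neg (not_not_intro h), if_pos ((ofList_eq_empty_iff _).mpr h)]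
  · rw [if_pos h, if_neg (fun hc => h ((ofList_eq_empty_iff _).mp hc))]
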